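-- pv_equiv track=rewrite | github.com/hitchin999/YidCal | custom_components/yidcal/ishpizin_sensor.py | _hebrew_year_string
-- ===== SOURCE A (Python) =====
-- _GERESH = "\u05F3"; _GERSHAYIM = "\u05F4"
--
-- _GERESH = "\u05F3"; _GERSHAYIM = "\u05F4"
--
-- _UNITS = {1:"א",2:"ב",3:"ג",4:"ד",5:"ה",6:"ו",7:"ז",8:"ח",9:"ט"}
--
-- _TENS = {10:"י",20:"כ",30:"ל",40:"מ",50:"נ",60:"ס",70:"ע",80:"פ",90:"צ"}
--
-- _HUNDREDS = {100:"ק",200:"ר",300:"ש",400:"ת"}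
--
-- def _hebrew_year_string(year: int) -> str:
--     y = year % 1000
--     parts: list[str] = []
--     for h in (400,300,200,100):
--         if y >= h:
--             parts.append(_HUNDREDS[h]); y -= h
--     if 10 <= y <= 19:
--         if y == 15: parts.append("טו"); y = 0
--         elif y == 16: parts.append("טז"); y = 0
--         else: parts.append(_TENS[10]); y -= 10
--     for t in (90,80,70,60,50,40,30,20,10):
--         if y >= t: parts.append(_TENS[t]); y -= t; break
--     if y in _UNITS: parts.append(_UNITS[y])
--     s = "".join(parts)
--     return s[:-1] + _GERSHAYIM + s[-1] if len(s) >= 2 else (s + _GERESH if s else s)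
-- ===== SOURCE B (Python) =====
-- _GERESH = "\u05F3"; _GERSHAYIM = "\u05F4"
--
-- # Digit-extraction re-implementation: divmod into hundreds/tens/units digits and
-- # table lookups (tables chosen to match the greedy output, incl. 800/900).
-- _H = ["", "\u05E7", "\u05E8", "\u05E9", "\u05EA",
--       "\u05EA\u05E7", "\u05EA\u05E8", "\u05EA\u05E9",
--       "\u05EA\u05E9\u05E7", "\u05EA\u05E9\u05E8"]
-- _T = ["", "\u05D9", "\u05DB", "\u05DC", "\u05DE", "\u05E0", "\u05E1", "\u05E2", "\u05E4", "\u05E6"]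
-- _U = ["", "\u05D0", "\u05D1", "\u05D2", "\u05D3", "\u05D4", "\u05D5", "\u05D6", "\u05D7", "\u05D8"]
--
-- def _hebrew_year_string(year: int) -> str:
--     h, rem = divmod(year % 1000, 100)
--     if rem == 15:
--         low = "\u05D8\u05D5"
--     elif rem == 16:
--         low = "\u05D8\u05D6"
--     else:
--         t, u = divmod(rem, 10)
--         low = _T[t] + _U[u]
--     s = _H[h] + low
--     if len(s) >= 2:
--         return s[:-1] + _GERSHAYIM + s[-1]
--     return s + _GERESH if s else s
-- ===== Notes on version B (the rewrite author's own statement) =====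
-- stated objective: simpler
-- what changed: Replaced A's greedy-subtraction loops over descending value tables with direct digit extraction (divmod into hundreds/tens/units) and per-digit lookup tables, with tables chosen to reproduce A's non-standard greedy hundreds spellings and the teen special cases.
import Mathlib
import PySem

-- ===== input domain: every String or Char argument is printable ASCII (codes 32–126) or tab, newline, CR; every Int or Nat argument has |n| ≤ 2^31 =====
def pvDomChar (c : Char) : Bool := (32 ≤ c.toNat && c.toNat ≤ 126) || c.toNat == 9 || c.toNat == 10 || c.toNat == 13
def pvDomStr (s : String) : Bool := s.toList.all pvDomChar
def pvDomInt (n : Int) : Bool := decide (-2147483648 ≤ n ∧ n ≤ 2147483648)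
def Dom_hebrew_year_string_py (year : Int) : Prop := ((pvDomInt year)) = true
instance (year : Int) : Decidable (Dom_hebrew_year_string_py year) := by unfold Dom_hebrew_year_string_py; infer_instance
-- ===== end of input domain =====

-- B replaces A's greedy-subtraction loops by digit extraction (divmod) with
-- per-digit lookup tables (objective: simpler).

-- ===== PORT A =====
def pvGERESH : String := "\u05F3"
def pvGERSHAYIM : String := "\u05F4"
def pvUNITS : PySem.Dict Int String :=
  PySem.Dict.ofList [(1,"א"),(2,"ב"),(3,"ג"),(4,"ד"),(5,"ה"),(6,"ו"),(7,"ז"),(8,"ח"),(9,"ט")]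
def pvTENS : PySem.Dict Int String :=
  PySem.Dict.ofList [(10,"י"),(20,"כ"),(30,"ל"),(40,"מ"),(50,"נ"),(60,"ס"),(70,"ע"),(80,"פ"),(90,"צ")]
def pvHUNDREDS : PySem.Dict Int String :=
  PySem.Dict.ofList [(100,"ק"),(200,"ר"),(300,"ש"),(400,"ת")]

-- the 'for t in (90,…,10): if y >= t: …; break' loop: scan, act on first hit only
def pvTensScan : List Int → List String × Int → List String × Int
  | [], st => st
  | t :: rest, (parts, y) =>
      if y ≥ t then (parts ++ [(pvTENS.get? t).getD ""], y - t)
      else pvTensScan rest (parts, y)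

def hebrew_year_string_py (year : Int) : String :=
  let y := PySem.Int.mod year 1000
  let st := [(400:Int),300,200,100].foldl
    (fun (st : List String × Int) h =>
      if st.2 ≥ h then (st.1 ++ [(pvHUNDREDS.get? h).getD ""], st.2 - h) else st)
    ([], y)
  let st :=
    if 10 ≤ st.2 ∧ st.2 ≤ 19 then
      if st.2 = 15 then (st.1 ++ ["טו"], (0:Int))
      else if st.2 = 16 then (st.1 ++ ["טז"], (0:Int))
      else (st.1 ++ [(pvTENS.get? 10).getD ""], st.2 - 10)
    else st
  let st := pvTensScan [90,80,70,60,50,40,30,20,10] st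
  let parts := if pvTENS.contains st.2 then st.1 else
               if pvUNITS.contains st.2 then st.1 ++ [(pvUNITS.get? st.2).getD ""] else st.1
  let s := PySem.Str.join "" parts
  let cs := s.toList
  if cs.length ≥ 2 then
    String.ofList (PySem.List.slice cs none (some (-1)) ++ pvGERSHAYIM.toList
               ++ (PySem.List.pyGet? cs (-1)).toList)
  else if cs.length ≥ 1 then String.ofList (cs ++ pvGERESH.toList)
  else s

-- ===== PORT B =====
def pvH : List String := ["", "ק", "ר", "ש", "ת", "תק", "תר", "תש", "תשק", "תשר"]
def pvT : List String := ["", "י", "כ", "ל", "מ", "נ", "ס", "ע", "פ", "צ"]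
def pvU : List String := ["", "א", "ב", "ג", "ד", "ה", "ו", "ז", "ח", "ט"]

def hebrew_year_string_py_alt (year : Int) : String :=
  let h := PySem.Int.floordiv (PySem.Int.mod year 1000) 100
  let rem := PySem.Int.mod (PySem.Int.mod year 1000) 100
  let low :=
    if rem = 15 then "טו"
    else if rem = 16 then "טז"
    else
      let t := PySem.Int.floordiv rem 10
      let u := PySem.Int.mod rem 10
      (pvT.getD t.toNat "") ++ (pvU.getD u.toNat "")
  let cs := ((pvH.getD h.toNat "") ++ low).toList
  if cs.length ≥ 2 then
    String.ofList (cs.dropLast ++ pvGERSHAYIM.toList ++ [cs.getLast!])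
  else if cs.length ≥ 1 then String.ofList (cs ++ pvGERESH.toList)
  else ""

-- ===== PRECONDITION & SPEC =====
def Spec_hebrew_year_string_py (year : Int) (out : String) : Prop := out = hebrew_year_string_py_alt year
instance (year : Int) (out : String) : Decidable (Spec_hebrew_year_string_py year out) := by unfold Spec_hebrew_year_string_py; infer_instance

-- ===== CLAIM (what is proved, stated in full; the proofs are below) =====
def Claim_equal_hebrew_year_string_py : Prop := ∀ (year : Int), Dom_hebrew_year_string_py year → Spec_hebrew_year_string_py year (hebrew_year_string_py year)

-- ===== LEMMAS AND PROOFS =====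

-- Both programs depend on year only through y = year % 1000 ∈ [0, 1000); check all 1000 residues.
set_option maxRecDepth 100000 in
set_option maxHeartbeats 4000000 in
theorem hebrew_residues (n : Nat) (hn : n < 1000) :
    hebrew_year_string_py (n : Int) = hebrew_year_string_py_alt (n : Int) := by
  revert n hn
  decide

theorem mod_self_small (n : Nat) (hn : n < 1000) :
    PySem.Int.mod (n : Int) 1000 = (n : Int) := by
  rw [PySem.Int.mod_eq_emod_of_pos (by norm_num)]
  omega

-- ===== VERDICT (by name: the statement is the Claim_ definition above) =====
theorem hebrew_year_string_py_spec : Claim_equal_hebrew_year_string_py := by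
  intro year _
  unfold Spec_hebrew_year_string_py
  have h0 : 0 ≤ PySem.Int.mod year 1000 := PySem.Int.mod_nonneg year (by norm_num)
  have h1 : PySem.Int.mod year 1000 < 1000 := PySem.Int.mod_lt year (by norm_num)
  set m := PySem.Int.mod year 1000 with hm
  obtain ⟨n, hn, hcast⟩ : ∃ n : Nat, n < 1000 ∧ (n : Int) = m :=
    ⟨m.toNat, by omega, by omega⟩
  have key : hebrew_year_string_py m = hebrew_year_string_py_alt m := by
    rw [← hcast]; exact hebrew_residues n hn
  -- both functions read year only through year % 1000; % is idempotent there
  have hAm : hebrew_year_string_py year = hebrew_year_string_py m := by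
    unfold hebrew_year_string_py
    rw [← hm, ← hcast, mod_self_small n hn]
  have hBm : hebrew_year_string_py_alt year = hebrew_year_string_py_alt m := by
    unfold hebrew_year_string_py_alt
    rw [← hm, ← hcast, mod_self_small n hn]
  rw [hAm, hBm, key]
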